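-- pv_equiv track=rewrite | github.com/koba925/alds | atcoder/ABC129/D.py | lamp_editorial1
-- ===== SOURCE A (Python) =====
-- def lamp_editorial1(H, W, S):
--     L = [[0] * W for _ in range(H)]
--     for r in range(H):
--         length = 0
--         for c in range(W):
--             length = 0 if S[r][c] == "#" else length + 1
--             L[r][c] = length
--
--     R = [[0] * W for _ in range(H)]
--     for r in range(H):
--         length = 0
--         for c in reversed(range(W)):
--             length = 0 if S[r][c] == "#" else length + 1
--             R[r][c] = length
--
--     U = [[0] * W for _ in range(H)]
--     for c in range(W):
--         length = 0
--         for r in range(H):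
--             length = 0 if S[r][c] == "#" else length + 1
--             U[r][c] = length
--
--     D = [[0] * W for _ in range(H)]
--     for c in range(W):
--         length = 0
--         for r in reversed(range(H)):
--             length = 0 if S[r][c] == "#" else length + 1
--             D[r][c] = length
--
--     max_light = 0
--     for r in range(H):
--         for c in range(W):
--             if S[r][c] == ".":
--                 light = L[r][c] + R[r][c] + U[r][c] + D[r][c] - 3
--                 max_light = max(max_light, light)
--
--     return max_light
-- ===== SOURCE B (Python) =====
-- def lamp_editorial1(H, W, S):
--     # Direct per-lamp scan: for each '.' cell walk left/right/up/down until a wall,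
--     # no precomputed tables.
--     best = 0
--     for r in range(H):
--         for c in range(W):
--             if S[r][c] == ".":
--                 light = 1
--                 cc = c - 1
--                 while cc >= 0 and S[r][cc] != "#":
--                     light += 1
--                     cc -= 1
--                 cc = c + 1
--                 while cc < W and S[r][cc] != "#":
--                     light += 1
--                     cc += 1
--                 rr = r - 1
--                 while rr >= 0 and S[rr][c] != "#":
--                     light += 1
--                     rr -= 1
--                 rr = r + 1
--                 while rr < H and S[rr][c] != "#":
--                     light += 1
--                     rr += 1
--                 if light > best:
--                     best = light
--     return best
-- ===== Notes on version B (the rewrite author's own statement) =====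
-- stated objective: alternative
-- what changed: Replaces A's four O(HW) directional accumulation tables plus a combine pass by a table-free direct scan: for each '.' cell B walks left, right, up and down until a wall and counts the illuminated cells on the spot.
import Mathlib
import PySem

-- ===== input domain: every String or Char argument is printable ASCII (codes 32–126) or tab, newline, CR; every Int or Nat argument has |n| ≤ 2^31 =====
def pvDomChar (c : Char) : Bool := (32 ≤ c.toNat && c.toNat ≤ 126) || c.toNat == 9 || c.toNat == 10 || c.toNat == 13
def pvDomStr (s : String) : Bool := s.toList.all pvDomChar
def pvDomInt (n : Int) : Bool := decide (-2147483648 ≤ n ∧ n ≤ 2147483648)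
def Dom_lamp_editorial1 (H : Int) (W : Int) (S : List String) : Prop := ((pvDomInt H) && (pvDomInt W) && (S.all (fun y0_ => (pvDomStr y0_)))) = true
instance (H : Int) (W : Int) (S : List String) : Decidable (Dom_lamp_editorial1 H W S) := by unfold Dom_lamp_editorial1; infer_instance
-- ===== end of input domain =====

-- B replaces A's four directional DP tables by a direct four-way walk from each '.' cell (alternative algorithm, same result).
-- grid accessor S[r][c]; out-of-range reads (which neither Python performs on Pre_) default to '#'
def pvCell (S : List String) (r c : Int) : Char :=
  (PySem.Str.pyGet? ((PySem.List.pyGet? S r).getD "") c).getD '#'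

-- ===== PORT A =====
-- one row/column pass of A: carry `length`, append the value written at each index
def pvPassFwd (cells : List Char) : Int × List Int :=
  cells.foldl (fun (st : Int × List Int) ch =>
    let len : Int := if ch = '#' then 0 else st.1 + 1
    (len, st.2 ++ [len])) (0, [])

-- the pass over reversed(range(·)): indices descend, so each value is written in front
def pvPassRev (cells : List Char) : Int × List Int :=
  cells.reverse.foldl (fun (st : Int × List Int) ch =>
    let len : Int := if ch = '#' then 0 else st.1 + 1
    (len, len :: st.2)) (0, [])

def pvRow (S : List String) (W r : Int) : List Char :=
  (PySem.List.pyRange 0 W 1).map (fun c => pvCell S r c)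

def pvCol (S : List String) (H c : Int) : List Char :=
  (PySem.List.pyRange 0 H 1).map (fun r => pvCell S r c)

-- T[i][j]
def pvAt (T : List (List Int)) (i j : Int) : Int :=
  PySem.List.pyGetD (PySem.List.pyGetD T i []) j 0

def lamp_editorial1 (H : Int) (W : Int) (S : List String) : Int :=
  let L := (PySem.List.pyRange 0 H 1).map (fun r => (pvPassFwd (pvRow S W r)).2)
  let R := (PySem.List.pyRange 0 H 1).map (fun r => (pvPassRev (pvRow S W r)).2)
  let U := (PySem.List.pyRange 0 W 1).map (fun c => (pvPassFwd (pvCol S H c)).2)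
  let D := (PySem.List.pyRange 0 W 1).map (fun c => (pvPassRev (pvCol S H c)).2)
  (PySem.List.pyRange 0 H 1).foldl (fun best r =>
    (PySem.List.pyRange 0 W 1).foldl (fun best c =>
      if pvCell S r c = '.' then
        max best (pvAt L r c + pvAt R r c + pvAt U c r + pvAt D c r - 3)
      else best) best) 0

-- ===== PORT B =====
-- while i >= 0 and get(i) != '#': count += 1; i -= 1   (fuel bounds the walk length)
def pvScanNeg (get : Int → Char) (i : Int) : Nat → Int
  | 0 => 0
  | fuel + 1 => if 0 ≤ i ∧ get i ≠ '#' then 1 + pvScanNeg get (i - 1) fuel else 0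

-- while i < bound and get(i) != '#': count += 1; i += 1
def pvScanPos (get : Int → Char) (bound i : Int) : Nat → Int
  | 0 => 0
  | fuel + 1 => if i < bound ∧ get i ≠ '#' then 1 + pvScanPos get bound (i + 1) fuel else 0

def lamp_editorial1_alt (H : Int) (W : Int) (S : List String) : Int :=
  (PySem.List.pyRange 0 H 1).foldl (fun best r =>
    (PySem.List.pyRange 0 W 1).foldl (fun best c =>
      if pvCell S r c = '.' then
        let light := 1 + pvScanNeg (fun cc => pvCell S r cc) (c - 1) W.toNat
                       + pvScanPos (fun cc => pvCell S r cc) W (c + 1) W.toNat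
                       + pvScanNeg (fun rr => pvCell S rr c) (r - 1) H.toNat
                       + pvScanPos (fun rr => pvCell S rr c) H (r + 1) H.toNat
        if light > best then light else best
      else best) best) 0

-- ===== PRECONDITION & SPEC =====
-- exactly the inputs on which Python A returns: whenever W > 0 it indexes S[r][c] for every r < H, c < W
def Pre_lamp_editorial1 (H : Int) (W : Int) (S : List String) : Prop :=
  0 < W → (H ≤ (S.length : Int) ∧ ∀ s ∈ S.take H.toNat, W ≤ (s.toList.length : Int))
instance (H : Int) (W : Int) (S : List String) : Decidable (Pre_lamp_editorial1 H W S) := by unfold Pre_lamp_editorial1; infer_instance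

def pvWitness_lamp_editorial1 : Int × Int × List String := (2, 3, [".#.", "..."])

def Spec_lamp_editorial1 (H : Int) (W : Int) (S : List String) (out : Int) : Prop := out = lamp_editorial1_alt H W S
instance (H : Int) (W : Int) (S : List String) (out : Int) : Decidable (Spec_lamp_editorial1 H W S out) := by unfold Spec_lamp_editorial1; infer_instance

-- ===== CLAIM (what is proved, stated in full; the proofs are below) =====
def Claim_equal_lamp_editorial1 : Prop := ∀ (H : Int) (W : Int) (S : List String), Dom_lamp_editorial1 H W S → Pre_lamp_editorial1 H W S → Spec_lamp_editorial1 H W S (lamp_editorial1 H W S)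

-- ===== LEMMAS AND PROOFS =====

-- length of the maximal non-'#' run ending at the back / starting at the front of a line
def pvRunE (l : List Char) : Int := ((l.reverse.takeWhile (fun ch => ch ≠ '#')).length : Int)
def pvRunS (l : List Char) : Int := ((l.takeWhile (fun ch => ch ≠ '#')).length : Int)

theorem pvRunE_append (l : List Char) (x : Char) :
    pvRunE (l ++ [x]) = if x = '#' then 0 else pvRunE l + 1 := by
  by_cases h : x = '#' <;> simp [pvRunE, h]

theorem pvRunS_cons (x : Char) (l : List Char) :
    pvRunS (x :: l) = if x = '#' then 0 else pvRunS l + 1 := by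
  by_cases h : x = '#' <;> simp [pvRunS, h]

-- A's forward pass: the carry is the run ending here, the written cell n holds the run ending at n
theorem pvPassFwd_eq (cells : List Char) :
    pvPassFwd cells =
      (pvRunE cells, (List.range cells.length).map (fun n => pvRunE (cells.take (n + 1)))) := by
  induction cells using List.reverseRecOn with
  | nil => simp [pvPassFwd, pvRunE]
  | append_singleton l x ih =>
    rw [pvPassFwd, List.foldl_append]
    rw [show l.foldl _ ((0 : Int), ([] : List Int)) = pvPassFwd l from rfl, ih]
    simp only [List.foldl_cons, List.foldl_nil]
    refine Prod.ext ?_ ?_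
    · simp [pvRunE_append l x]
    · simp only [List.length_append, List.length_singleton, List.range_succ, List.map_append,
        List.map_cons, List.map_nil]
      congr 1
      · apply List.map_congr_left
        intro k hk
        rw [List.mem_range] at hk
        rw [List.take_append_of_le_length (by omega)]
      · simp [pvRunE_append l x, List.take_of_length_le]

-- A's reversed pass: cell n holds the run starting at n
theorem pvPassRev_eq (cells : List Char) :
    pvPassRev cells =
      (pvRunS cells, (List.range cells.length).map (fun n => pvRunS (cells.drop n))) := by
  induction cells with
  | nil => simp [pvPassRev, pvRunS]
  | cons x l ih =>
    rw [pvPassRev, List.reverse_cons, List.foldl_append]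
    rw [show l.reverse.foldl _ ((0 : Int), ([] : List Int)) = pvPassRev l from rfl, ih]
    simp only [List.foldl_cons, List.foldl_nil]
    refine Prod.ext ?_ ?_
    · simp [pvRunS_cons x l]
    · simp only [List.length_cons, List.range_succ_eq_map, List.map_cons, List.map_map,
        List.drop_zero]
      refine congrArg₂ _ ?_ ?_
      · simp [pvRunS_cons x l]
      · apply List.map_congr_left
        intro k _
        simp

-- B's downward walk from c-1 counts the run ending at c-1
theorem pvScanNeg_eq (get : Int → Char) (c : Nat) :
    ∀ fuel : Nat, c ≤ fuel →
      pvScanNeg get ((c : Int) - 1) fuel = pvRunE ((List.range c).map (fun k : Nat => get (k : Int))) := by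
  induction c with
  | zero =>
    intro fuel _
    cases fuel with
    | zero => simp [pvScanNeg, pvRunE]
    | succ f => simp [pvScanNeg, pvRunE]
  | succ c ih =>
    intro fuel hf
    obtain ⟨f, rfl⟩ : ∃ f, fuel = f + 1 := ⟨fuel - 1, by omega⟩
    rw [show ((c + 1 : Nat) : Int) - 1 = (c : Int) by push_cast; ring]
    rw [List.range_succ, List.map_append, List.map_cons, List.map_nil,
        pvRunE_append]
    by_cases hx : get (c : Int) = '#'
    · simp [pvScanNeg, hx]
    · rw [pvScanNeg]
      rw [if_pos ⟨by positivity, hx⟩, ih f (by omega)]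
      simp [hx]; ring

-- B's upward walk from c counts the run starting at c
theorem pvScanPos_eq (get : Int → Char) (N : Nat) :
    ∀ (fuel c : Nat), c ≤ N → N - c ≤ fuel →
      pvScanPos get (N : Int) (c : Int) fuel
        = pvRunS (((List.range N).map (fun k : Nat => get (k : Int))).drop c) := by
  intro fuel
  induction fuel with
  | zero =>
    intro c hc hf
    have : c = N := by omega
    subst this
    rw [pvScanPos, List.drop_eq_nil_of_le (by simp)]; simp [pvRunS]
  | succ f ih =>
    intro c hc hf
    by_cases hcN : c < N
    · have hlen : c < ((List.range N).map (fun k : Nat => get (k : Int))).length := by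
        simpa using hcN
      rw [List.drop_eq_getElem_cons hlen]
      simp only [List.getElem_map, List.getElem_range]
      rw [pvRunS_cons]
      by_cases hx : get (c : Int) = '#'
      · simp [pvScanPos, hx]
      · rw [pvScanPos, if_pos ⟨by exact_mod_cast hcN, hx⟩]
        rw [show ((c : Int) + 1) = ((c + 1 : Nat) : Int) by push_cast; ring]
        rw [ih (c + 1) (by omega) (by omega)]
        simp [hx]; ring
    · have : c = N := by omega
      subst this
      rw [pvScanPos, if_neg (by simp)]
      rw [List.drop_eq_nil_of_le (by simp)]; simp [pvRunS]

theorem pvCells_eq (get : Int → Char) (n : Int) :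
    (PySem.List.pyRange 0 n 1).map get
      = (List.range n.toNat).map (fun k : Nat => get (k : Int)) := by
  rw [PySem.List.pyRange_one]
  simp [List.map_map, Function.comp_def]

-- A's forward table entry at an unlit-free cell = 1 + B's downward walk
theorem pvLineFwd (get : Int → Char) (n i : Int) (h0 : 0 ≤ i) (hi : i < n)
    (hx : get i ≠ '#') :
    PySem.List.pyGetD (pvPassFwd ((PySem.List.pyRange 0 n 1).map get)).2 i 0
      = 1 + pvScanNeg get (i - 1) n.toNat := by
  have hci : (i.toNat : Int) = i := Int.toNat_of_nonneg h0
  have hciN : i.toNat < n.toNat := by omega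
  rw [pvCells_eq get n, pvPassFwd_eq]
  dsimp only
  rw [← hci, PySem.List.pyGetD_natCast, List.getD_eq_getElem _ _ (by simp; omega)]
  simp only [List.getElem_map, List.getElem_range]
  rw [← List.map_take, List.take_range, min_eq_left (by omega)]
  rw [List.range_succ, List.map_append, List.map_cons, List.map_nil, pvRunE_append]
  rw [if_neg (by rwa [hci])]
  rw [pvScanNeg_eq get i.toNat n.toNat (by omega)]
  ring

-- A's reversed table entry at such a cell = 1 + B's upward walk
theorem pvLineRev (get : Int → Char) (n i : Int) (h0 : 0 ≤ i) (hi : i < n)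
    (hx : get i ≠ '#') :
    PySem.List.pyGetD (pvPassRev ((PySem.List.pyRange 0 n 1).map get)).2 i 0
      = 1 + pvScanPos get n (i + 1) n.toNat := by
  have hn0 : 0 ≤ n := by omega
  have hci : (i.toNat : Int) = i := Int.toNat_of_nonneg h0
  have hciN : i.toNat < n.toNat := by omega
  rw [pvCells_eq get n, pvPassRev_eq]
  dsimp only
  rw [← hci, PySem.List.pyGetD_natCast, List.getD_eq_getElem _ _ (by simp; omega)]
  simp only [List.getElem_map, List.getElem_range]
  rw [List.drop_eq_getElem_cons (by simp; omega)]
  simp only [List.getElem_map, List.getElem_range]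
  rw [pvRunS_cons, if_neg (by rwa [hci])]
  rw [← pvScanPos_eq get n.toNat n.toNat (i.toNat + 1) (by omega) (by omega)]
  rw [Int.toNat_of_nonneg hn0]
  push_cast [hci]
  ring

-- ===== VERDICT (by name: the statement is the Claim_ definition above) =====
theorem lamp_editorial1_spec : Claim_equal_lamp_editorial1 := by
  intro H W S _ _
  show lamp_editorial1 H W S = lamp_editorial1_alt H W S
  unfold lamp_editorial1 lamp_editorial1_alt pvAt pvRow pvCol
  dsimp only
  apply PySem.List.foldl_congr_mem'
  intro r hr best
  rw [PySem.List.mem_pyRange_one] at hr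
  apply PySem.List.foldl_congr_mem'
  intro c hc best'
  rw [PySem.List.mem_pyRange_one] at hc
  by_cases hdot : pvCell S r c = '.'
  · rw [if_pos hdot, if_pos hdot]
    have hx : pvCell S r c ≠ '#' := by rw [hdot]; decide
    rw [PySem.List.pyGetD_map_pyRange_of_nonneg _ H r [] hr.1 hr.2,
        PySem.List.pyGetD_map_pyRange_of_nonneg _ H r [] hr.1 hr.2,
        PySem.List.pyGetD_map_pyRange_of_nonneg _ W c [] hc.1 hc.2,
        PySem.List.pyGetD_map_pyRange_of_nonneg _ W c [] hc.1 hc.2]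
    rw [pvLineFwd (fun cc => pvCell S r cc) W c hc.1 hc.2 hx,
        pvLineRev (fun cc => pvCell S r cc) W c hc.1 hc.2 hx,
        pvLineFwd (fun rr => pvCell S rr c) H r hr.1 hr.2 hx,
        pvLineRev (fun rr => pvCell S rr c) H r hr.1 hr.2 hx]
    generalize pvScanNeg (fun cc => pvCell S r cc) (c - 1) W.toNat = a
    generalize pvScanPos (fun cc => pvCell S r cc) W (c + 1) W.toNat = b
    generalize pvScanNeg (fun rr => pvCell S rr c) (r - 1) H.toNat = u
    generalize pvScanPos (fun rr => pvCell S rr c) H (r + 1) H.toNat = d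
    have hv : 1 + a + (1 + b) + (1 + u) + (1 + d) - 3 = 1 + a + b + u + d := by ring
    rw [hv]
    split_ifs with h
    · exact max_eq_right h.le
    · exact max_eq_left (not_lt.1 h)
  · rw [if_neg hdot, if_neg hdot]
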